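-- pv_equiv track=rewrite | github.com/charlesneimog/pd-ji | pd-ji.py | diamond
-- ===== SOURCE A (Python) =====
-- def diamond(limit):
--     """
--     Returns two lists of lists representing the otonality and utonality matrices of a Partch's diamond.
--
--     Args:
--     - limit: An integer representing the maximum odd number to include in the diamond.
--
--     Returns:
--     - A list of two lists of lists of strings representing the otonality and utonality matrices of the diamond. The first list contains the otonality matrix, and the second list contains the utonality matrix.
--     """
--
--     identities = range(1, limit + 1, 2)
--     otonal = []
--     utonal = []
--     for i in identities:
--         otonality = []
--         utonality = []
--         for j in identities:
--             otonality.append(f"{j}/{i}")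
--             utonality.append(f"{i}/{j}")
--         otonal.append(otonality)
--         utonal.append(utonality)
--     return [otonal, utonal]
-- ===== SOURCE B (Python) =====
-- def diamond(limit):
--     identities = range(1, limit + 1, 2)
--     otonal = [[f"{j}/{i}" for j in identities] for i in identities]
--     # utonality is the transpose of otonality: reuse the already-built strings
--     utonal = [[row[k] for row in otonal] for k in range(len(otonal))]
--     return [otonal, utonal]
-- ===== Notes on version B (the rewrite author's own statement) =====
-- stated objective: alternative
-- what changed: B builds only the otonality matrix with nested comprehensions and derives the utonality matrix by transposing it (reusing the already-built strings), instead of A's single nested loop formatting every cell twice into two accumulators.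
import Mathlib
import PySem

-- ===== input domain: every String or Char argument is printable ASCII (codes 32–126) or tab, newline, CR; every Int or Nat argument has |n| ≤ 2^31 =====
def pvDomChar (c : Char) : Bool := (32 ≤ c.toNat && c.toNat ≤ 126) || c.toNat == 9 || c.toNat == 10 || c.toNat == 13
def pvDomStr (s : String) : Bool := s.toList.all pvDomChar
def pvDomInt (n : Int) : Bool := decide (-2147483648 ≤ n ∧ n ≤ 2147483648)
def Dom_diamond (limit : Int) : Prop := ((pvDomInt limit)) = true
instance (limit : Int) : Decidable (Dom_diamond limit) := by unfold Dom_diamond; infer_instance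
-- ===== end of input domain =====

-- B builds only the otonality matrix and derives the utonality matrix as its transpose
-- (each cell formatted once and reused), instead of A's loop formatting every cell twice.


-- ===== PORT A =====
def diamond (limit : Int) : List (List (List String)) :=
  let identities := PySem.List.pyRange 1 (limit + 1) 2
  let ou := identities.foldl
    (fun (acc : List (List String) × List (List String)) i =>
      let p := identities.foldl
        (fun (p : List String × List String) j =>
          (p.1 ++ [PySem.Int.toStr j ++ "/" ++ PySem.Int.toStr i],
           p.2 ++ [PySem.Int.toStr i ++ "/" ++ PySem.Int.toStr j]))
        ([], [])
      (acc.1 ++ [p.1], acc.2 ++ [p.2]))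
    ([], [])
  [ou.1, ou.2]

-- ===== PORT B =====
def diamond_alt (limit : Int) : List (List (List String)) :=
  let identities := PySem.List.pyRange 1 (limit + 1) 2
  let otonal := identities.map
    (fun i => identities.map (fun j => PySem.Int.toStr j ++ "/" ++ PySem.Int.toStr i))
  -- row[k] with k from range(len(otonal)): always in range (the matrix is square),
  -- so pyGetD's default never fires
  let utonal := (PySem.List.pyRange 0 (otonal.length : Int) 1).map
    (fun k => otonal.map (fun row => PySem.List.pyGetD row k ""))
  [otonal, utonal]

-- ===== PRECONDITION & SPEC =====
def Spec_diamond (limit : Int) (out : List (List (List String))) : Prop := out = diamond_alt limit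
instance (limit : Int) (out : List (List (List String))) : Decidable (Spec_diamond limit out) := by unfold Spec_diamond; infer_instance

-- ===== CLAIM (what is proved, stated in full; the proofs are below) =====
def Claim_equal_diamond : Prop := ∀ (limit : Int), Dom_diamond limit → Spec_diamond limit (diamond limit)

-- ===== LEMMAS AND PROOFS =====

-- A's inner loop appends one cell per identity to each accumulator
theorem pv_inner (ids : List Int) (i : Int) (a b : List String) :
    ids.foldl
      (fun (p : List String × List String) j =>
        (p.1 ++ [PySem.Int.toStr j ++ "/" ++ PySem.Int.toStr i],
         p.2 ++ [PySem.Int.toStr i ++ "/" ++ PySem.Int.toStr j])) (a, b)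
    = (a ++ ids.map (fun j => PySem.Int.toStr j ++ "/" ++ PySem.Int.toStr i),
       b ++ ids.map (fun j => PySem.Int.toStr i ++ "/" ++ PySem.Int.toStr j)) := by
  induction ids generalizing a b with
  | nil => simp
  | cons x xs ih => simp [List.foldl_cons, ih]

-- a fold appending one element per item to each component equals two maps
theorem pv_fold2 {a0 : Type} (F G : a0 -> List String) (l : List a0) (a b : List (List String)) :
    l.foldl (fun acc i => (acc.1 ++ [F i], acc.2 ++ [G i])) (a, b) = (a ++ l.map F, b ++ l.map G) := by
  induction l generalizing a b with
  | nil => simp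
  | cons x xs ih => simp [List.foldl_cons, ih]

-- indexing the k-th column of the square comprehension matrix
theorem pv_getD_map (ids : List Int) (g : Int → String) (k : Nat) (hk : k < ids.length) :
    (ids.map g).getD k "" = g ids[k] := by
  simp [List.getD_eq_getElem?_getD, hk]

-- the transpose of the square matrix [[f j i for j] for i] is [[f i j for j] for i]
theorem pv_transpose (ids : List Int) (f : Int → Int → String) :
    (List.range ids.length).map
      (fun k => ids.map (fun i => (ids.map (fun j => f j i)).getD k ""))
    = ids.map (fun i => ids.map (fun j => f i j)) := by
  apply List.ext_getElem
  · simp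
  · intro r h1 h2
    simp only [List.getElem_map, List.getElem_range]
    have hr : r < ids.length := by simpa using h1
    refine List.map_congr_left (fun i _ => ?_)
    rw [pv_getD_map ids (fun j => f j i) r hr]

-- ===== VERDICT (by name: the statement is the Claim_ definition above) =====
theorem diamond_spec : Claim_equal_diamond := by
  intro limit _
  unfold Spec_diamond diamond diamond_alt
  simp only [pv_inner, List.nil_append]
  rw [pv_fold2 (fun i => (PySem.List.pyRange 1 (limit + 1) 2).map (fun j => PySem.Int.toStr j ++ "/" ++ PySem.Int.toStr i))
       (fun i => (PySem.List.pyRange 1 (limit + 1) 2).map (fun j => PySem.Int.toStr i ++ "/" ++ PySem.Int.toStr j))]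
  simp only [List.nil_append]
  set ids := PySem.List.pyRange 1 (limit + 1) 2 with hids
  congr 1
  congr 1
  rw [← pv_transpose ids (fun i j => PySem.Int.toStr i ++ "/" ++ PySem.Int.toStr j)]
  rw [List.length_map, PySem.List.pyRange_zero_natCast]
  simp only [List.map_map]
  refine List.map_congr_left (fun k _ => ?_)
  refine List.map_congr_left (fun i _ => ?_)
  simp [Function.comp, PySem.List.pyGetD_natCast]
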